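-- pv_equiv track=rewrite | github.com/danielcamposramos/Scaler_Wizzard | components/scaling/profile_recommender.py | _profile_priority
-- ===== SOURCE A (Python) =====
-- def _profile_priority(use_case: str, model_size: str) -> list[str]:
--     """Determines the order of profiles to check based on use case and model size.
--
--     Args:
--         use_case (str): The primary use case.
--         model_size (str): The model size.
--
--     Returns:
--         list[str]: A list of profile names in order of priority.
--     """
--     mapping = {
--         "long_context": ["max_context", "balanced_scaling", "budget_context"],
--         "reasoning": ["max_parameters", "reasoning_boost", "balanced_scaling"],
--         "creative": ["creative_fusion", "balanced_scaling"],
--         "default": ["balanced_scaling", "budget_context"],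
--     }
--     priority = list(mapping.get(use_case, mapping["default"]))
--     if model_size == "large":
--         priority.insert(0, "max_parameters")
--     # Remove duplicates while preserving order.
--     seen = set()
--     ordered: list[str] = []
--     for item in priority:
--         if item not in seen:
--             seen.add(item)
--             ordered.append(item)
--     return ordered
-- ===== SOURCE B (Python) =====
-- def _profile_priority(use_case: str, model_size: str) -> list[str]:
--     """Determines the order of profiles to check based on use case and model size."""
--     # Fully precomputed results: with only four base lists and one possible
--     # insertion, every outcome is a small literal.  Note that for "reasoning"
--     # the base already starts with "max_parameters", so size does not matter.
--     large = model_size == "large"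
--     if use_case == "long_context":
--         return (["max_parameters", "max_context", "balanced_scaling", "budget_context"]
--                 if large else ["max_context", "balanced_scaling", "budget_context"])
--     if use_case == "reasoning":
--         return ["max_parameters", "reasoning_boost", "balanced_scaling"]
--     if use_case == "creative":
--         return (["max_parameters", "creative_fusion", "balanced_scaling"]
--                 if large else ["creative_fusion", "balanced_scaling"])
--     return (["max_parameters", "balanced_scaling", "budget_context"]
--             if large else ["balanced_scaling", "budget_context"])
-- ===== Notes on version B (the rewrite author's own statement) =====
-- stated objective: simpler
-- what changed: Replaces the dict lookup, insert and seen-set dedup loop with a direct case analysis returning precomputed literal lists (the 'reasoning' base already starts with 'max_parameters', so the large-size insert is a no-op there).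
import Mathlib
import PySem

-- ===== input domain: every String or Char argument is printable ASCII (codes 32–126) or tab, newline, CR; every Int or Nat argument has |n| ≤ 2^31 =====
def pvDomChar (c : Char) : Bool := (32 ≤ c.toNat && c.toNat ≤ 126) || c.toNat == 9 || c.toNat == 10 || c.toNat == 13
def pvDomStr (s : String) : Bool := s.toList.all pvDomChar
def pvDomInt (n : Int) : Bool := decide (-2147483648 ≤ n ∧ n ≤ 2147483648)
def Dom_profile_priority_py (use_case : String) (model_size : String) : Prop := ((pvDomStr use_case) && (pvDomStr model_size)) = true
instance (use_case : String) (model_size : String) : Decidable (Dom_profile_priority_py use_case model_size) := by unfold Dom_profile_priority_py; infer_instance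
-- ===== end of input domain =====

-- B is simpler: a direct case analysis returning precomputed literal lists,
-- with no dict, no insert and no dedup pass.

-- ===== PORT A =====
def profile_priority_py (use_case : String) (model_size : String) : List String :=
  let mapping : PySem.Dict String (List String) := PySem.Dict.ofList
    [("long_context", ["max_context", "balanced_scaling", "budget_context"]),
     ("reasoning", ["max_parameters", "reasoning_boost", "balanced_scaling"]),
     ("creative", ["creative_fusion", "balanced_scaling"]),
     ("default", ["balanced_scaling", "budget_context"])]
  let priority := mapping.getD use_case (mapping.getD "default" [])
  let priority := if model_size == "large" then PySem.List.insert priority 0 "max_parameters" else priority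
  -- Remove duplicates while preserving order.
  let st : PySem.Set String × List String :=
    priority.foldl
      (fun st item =>
        if PySem.Set.contains st.1 item then st
        else (PySem.Set.add st.1 item, st.2 ++ [item]))
      (PySem.Set.empty, [])
  st.2

-- ===== PORT B =====
def profile_priority_py_alt (use_case : String) (model_size : String) : List String :=
  let large := model_size == "large"
  if use_case == "long_context" then
    if large then ["max_parameters", "max_context", "balanced_scaling", "budget_context"]
    else ["max_context", "balanced_scaling", "budget_context"]
  else if use_case == "reasoning" then
    ["max_parameters", "reasoning_boost", "balanced_scaling"]
  else if use_case == "creative" then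
    if large then ["max_parameters", "creative_fusion", "balanced_scaling"]
    else ["creative_fusion", "balanced_scaling"]
  else
    if large then ["max_parameters", "balanced_scaling", "budget_context"]
    else ["balanced_scaling", "budget_context"]

-- ===== PRECONDITION & SPEC =====
def Spec_profile_priority_py (use_case : String) (model_size : String) (out : List String) : Prop := out = profile_priority_py_alt use_case model_size
instance (use_case : String) (model_size : String) (out : List String) : Decidable (Spec_profile_priority_py use_case model_size out) := by unfold Spec_profile_priority_py; infer_instance

-- ===== CLAIM (what is proved, stated in full; the proofs are below) =====
def Claim_equal_profile_priority_py : Prop := ∀ (use_case : String) (model_size : String), Dom_profile_priority_py use_case model_size → Spec_profile_priority_py use_case model_size (profile_priority_py use_case model_size)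

-- ===== LEMMAS AND PROOFS =====

-- ===== VERDICT (by name: the statement is the Claim_ definition above) =====
-- Lookup miss: for a use_case equal to none of the four keys, the dict lookup
-- returns the supplied default.
theorem pv_getD_other (u : String) (d : List String)
    (h1 : u ≠ "long_context") (h2 : u ≠ "reasoning") (h3 : u ≠ "creative") (h4 : u ≠ "default") :
    PySem.Dict.getD (PySem.Dict.ofList
      [("long_context", ["max_context", "balanced_scaling", "budget_context"]),
       ("reasoning", ["max_parameters", "reasoning_boost", "balanced_scaling"]),
       ("creative", ["creative_fusion", "balanced_scaling"]),
       ("default", ["balanced_scaling", "budget_context"])]) u d = d := by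
  have hmk : (PySem.Dict.ofList
      [("long_context", ["max_context", "balanced_scaling", "budget_context"]),
       ("reasoning", ["max_parameters", "reasoning_boost", "balanced_scaling"]),
       ("creative", ["creative_fusion", "balanced_scaling"]),
       ("default", ["balanced_scaling", "budget_context"])] : PySem.Dict String (List String))
      = PySem.Dict.mk
      [("long_context", ["max_context", "balanced_scaling", "budget_context"]),
       ("reasoning", ["max_parameters", "reasoning_boost", "balanced_scaling"]),
       ("creative", ["creative_fusion", "balanced_scaling"]),
       ("default", ["balanced_scaling", "budget_context"])] := by decide
  rw [hmk]
  simp [PySem.Dict.getD, PySem.Dict.get?,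
    Ne.symm h1, Ne.symm h2, Ne.symm h3, Ne.symm h4]

theorem profile_priority_py_spec : Claim_equal_profile_priority_py := by
  intro u m _
  unfold Spec_profile_priority_py
  have hb : (m == "large") = true ∨ (m == "large") = false := by
    cases h : (m == "large") <;> simp
  by_cases h1 : u = "long_context"
  · subst h1; rcases hb with hb | hb <;>
      (simp only [profile_priority_py, profile_priority_py_alt, hb]; decide)
  by_cases h2 : u = "reasoning"
  · subst h2; rcases hb with hb | hb <;>
      (simp only [profile_priority_py, profile_priority_py_alt, hb]; decide)
  by_cases h3 : u = "creative"
  · subst h3; rcases hb with hb | hb <;>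
      (simp only [profile_priority_py, profile_priority_py_alt, hb]; decide)
  by_cases h4 : u = "default"
  · subst h4; rcases hb with hb | hb <;>
      (simp only [profile_priority_py, profile_priority_py_alt, hb]; decide)
  · have hu1 : (u == "long_context") = false := by simp [h1]
    have hu2 : (u == "reasoning") = false := by simp [h2]
    have hu3 : (u == "creative") = false := by simp [h3]
    rcases hb with hb | hb <;>
      (simp only [profile_priority_py, profile_priority_py_alt, hb, hu1, hu2, hu3,
        pv_getD_other u _ h1 h2 h3 h4]; decide)
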